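-- pv_equiv track=rewrite | github.com/DaniYuna99/Recuperacion_1Evaluacion | ejercicios/Ejercicio8.py | detectarCaracteresIncorrectos
-- ===== SOURCE A (Python) =====
-- def detectarCaracteresIncorrectos (cadena):
--     sonLetras = False
--     sonNumeros = False
--     vistoBueno = False
--
--     for chara in (cadena) :
--         if (chara.isalpha()) :
--             sonLetras = True
--         elif (chara.isnumeric()) :
--             sonNumeros = True
--
--         if (chara.isalpha() and sonLetras == True) :
--             vistoBueno = True
--
--         if (chara.isnumeric() and sonLetras == True) :
--             vistoBueno = False
--             break
--
--         if (chara.isnumeric() and sonNumeros == True) :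
--             vistoBueno = True
--
--         if (chara.isalpha() and sonNumeros == True) :
--             vistoBueno = False
--             break
--
--     return (vistoBueno)
-- ===== SOURCE B (Python) =====
-- def detectarCaracteresIncorrectos(cadena):
--     has_alpha = any(c.isalpha() for c in cadena)
--     has_num = any(c.isnumeric() for c in cadena)
--     return has_alpha != has_num
-- ===== Notes on version B (the rewrite author's own statement) =====
-- stated objective: simpler
-- what changed: Replaces the stateful early-break state machine (sonLetras/sonNumeros/vistoBueno) with two independent any() category scans combined by XOR: true iff exactly one of the two character categories is present.
import Mathlib
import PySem

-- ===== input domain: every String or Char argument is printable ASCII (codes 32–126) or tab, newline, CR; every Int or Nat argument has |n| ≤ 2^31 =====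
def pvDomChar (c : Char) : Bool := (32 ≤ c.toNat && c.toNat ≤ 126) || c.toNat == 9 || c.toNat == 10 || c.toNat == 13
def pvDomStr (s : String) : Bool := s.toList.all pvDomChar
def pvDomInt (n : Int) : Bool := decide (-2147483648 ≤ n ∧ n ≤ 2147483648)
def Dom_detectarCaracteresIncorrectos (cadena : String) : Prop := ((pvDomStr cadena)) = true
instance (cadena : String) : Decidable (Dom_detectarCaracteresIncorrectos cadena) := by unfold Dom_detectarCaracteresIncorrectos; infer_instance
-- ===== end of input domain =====

-- B replaces A's stateful early-break state machine with two independent category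
-- scans (any alpha, any digit) combined by XOR; same cost, simpler decomposition.


-- ===== PORT A =====
-- Python's `isnumeric()` is ported as PySem.Chars.isdigit — exact on the ASCII domain,
-- where the two predicates coincide (both = '0'..'9').
-- The for-loop with `break` becomes structural recursion over the char list carrying
-- the three state variables (sonLetras, sonNumeros, vistoBueno).
def pvLoopA : List Char → Bool → Bool → Bool → Bool
  | [], _, _, vistoBueno => vistoBueno
  | chara :: rest, sonLetras, sonNumeros, vistoBueno =>
    -- if chara.isalpha(): sonLetras = True ; elif chara.isnumeric(): sonNumeros = True
    let sonLetras := if PySem.Chars.isalpha chara then true else sonLetras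
    let sonNumeros := if !PySem.Chars.isalpha chara && PySem.Chars.isdigit chara then true else sonNumeros
    -- if chara.isalpha() and sonLetras == True: vistoBueno = True
    let vistoBueno := if PySem.Chars.isalpha chara && sonLetras then true else vistoBueno
    -- if chara.isnumeric() and sonLetras == True: vistoBueno = False; break
    if PySem.Chars.isdigit chara && sonLetras then false
    else
      -- if chara.isnumeric() and sonNumeros == True: vistoBueno = True
      let vistoBueno := if PySem.Chars.isdigit chara && sonNumeros then true else vistoBueno
      -- if chara.isalpha() and sonNumeros == True: vistoBueno = False; break
      if PySem.Chars.isalpha chara && sonNumeros then false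
      else pvLoopA rest sonLetras sonNumeros vistoBueno

def detectarCaracteresIncorrectos (cadena : String) : Bool :=
  pvLoopA cadena.toList false false false

-- ===== PORT B =====
def detectarCaracteresIncorrectos_alt (cadena : String) : Bool :=
  let hasAlpha := cadena.toList.any PySem.Chars.isalpha
  let hasNum := cadena.toList.any PySem.Chars.isdigit
  hasAlpha != hasNum

-- ===== PRECONDITION & SPEC =====
def Spec_detectarCaracteresIncorrectos (cadena : String) (out : Bool) : Prop := out = detectarCaracteresIncorrectos_alt cadena
instance (cadena : String) (out : Bool) : Decidable (Spec_detectarCaracteresIncorrectos cadena out) := by unfold Spec_detectarCaracteresIncorrectos; infer_instance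

-- ===== CLAIM (what is proved, stated in full; the proofs are below) =====
def Claim_equal_detectarCaracteresIncorrectos : Prop := ∀ (cadena : String), Dom_detectarCaracteresIncorrectos cadena → Spec_detectarCaracteresIncorrectos cadena (detectarCaracteresIncorrectos cadena)

-- ===== LEMMAS AND PROOFS =====

-- ASCII letter and digit predicates are disjoint (true for all of Char here).
theorem pvAlphaDigitDisjoint (c : Char) :
    (PySem.Chars.isalpha c && PySem.Chars.isdigit c) = false := by
  simp only [PySem.Chars.isalpha, PySem.Chars.isdigit, PySem.Chars.isupper, PySem.Chars.islower]
  by_cases h : c ≤ '9'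
  · have h1 : ¬ ('A' ≤ c) := by intro h2; exact absurd (le_trans h2 h) (by decide)
    have h2 : ¬ ('a' ≤ c) := by intro h2; exact absurd (le_trans h2 h) (by decide)
    simp [h1, h2]
  · simp [h]

-- Characterisation of pvLoopA on the three states actually reachable from the start.
theorem pvLoopA_char (cs : List Char) :
    pvLoopA cs false false false = (cs.any PySem.Chars.isalpha != cs.any PySem.Chars.isdigit)
    ∧ pvLoopA cs true false true = !(cs.any PySem.Chars.isdigit)
    ∧ pvLoopA cs false true true = !(cs.any PySem.Chars.isalpha) := by
  induction cs with
  | nil => simp [pvLoopA]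
  | cons c rest ih =>
    obtain ⟨ih1, ih2, ih3⟩ := ih
    have hdisj := pvAlphaDigitDisjoint c
    by_cases ha : PySem.Chars.isalpha c
    · have hd : PySem.Chars.isdigit c = false := by
        cases hdd : PySem.Chars.isdigit c <;> simp_all
      exact ⟨by simp [pvLoopA, ha, hd, ih2], by simp [pvLoopA, ha, hd, ih2],
             by simp [pvLoopA, ha, hd]⟩
    · by_cases hd : PySem.Chars.isdigit c
      · exact ⟨by simp [pvLoopA, ha, hd, ih3], by simp [pvLoopA, ha, hd],
               by simp [pvLoopA, ha, hd, ih3]⟩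
      · exact ⟨by simp [pvLoopA, ha, hd, ih1], by simp [pvLoopA, ha, hd, ih2],
               by simp [pvLoopA, ha, hd, ih3]⟩

-- ===== VERDICT (by name: the statement is the Claim_ definition above) =====
theorem detectarCaracteresIncorrectos_spec : Claim_equal_detectarCaracteresIncorrectos := by
  intro cadena _
  unfold Spec_detectarCaracteresIncorrectos detectarCaracteresIncorrectos detectarCaracteresIncorrectos_alt
  exact (pvLoopA_char cadena.toList).1
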